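-- pv_equiv track=rewrite | github.com/thegrenadinekid25/neume-ml | src/synthesis/voicing.py | _fit_to_range
-- ===== SOURCE A (Python) =====
-- from typing import Dict, List, Optional, Tuple, Union
--
-- def _fit_to_range(
--     notes: List[int],
--     bass_floor: int,
--     soprano_ceiling: int,
-- ) -> List[int]:
--     """Adjust notes to fit within valid range, maintaining intervals."""
--     if not notes:
--         return notes
--
--     notes = list(notes)  # Make a copy
--
--     # If highest note exceeds ceiling, shift everything down
--     if notes[-1] > soprano_ceiling:
--         shift = notes[-1] - soprano_ceiling
--         notes = [n - shift for n in notes]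
--
--     # If lowest note is below floor, shift up
--     if notes[0] < bass_floor:
--         shift = bass_floor - notes[0]
--         notes = [n + shift for n in notes]
--
--     # Final clamp (shouldn't be needed if logic is correct, but safety)
--     notes = [max(bass_floor, min(soprano_ceiling, n)) for n in notes]
--
--     return notes
-- ===== SOURCE B (Python) =====
-- from typing import List
--
-- def _fit_to_range(
--     notes: List[int],
--     bass_floor: int,
--     soprano_ceiling: int,
-- ) -> List[int]:
--     """Adjust notes to fit within valid range, maintaining intervals.
--
--     Instead of A's staged whole-list shift passes, the whole transposition is a
--     single closed-form offset: net = max(bass_floor - notes[0],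
--     min(0, soprano_ceiling - notes[-1])) (the floor-shift wins over the
--     ceiling-shift exactly as in A's sequential order).  One explicit loop then
--     transposes each note and saturates it with two branch tests.
--     """
--     if not notes:
--         return notes
--     net = max(bass_floor - notes[0], min(0, soprano_ceiling - notes[-1]))
--     out = []
--     for n in notes:
--         v = n + net
--         if v > soprano_ceiling:
--             v = soprano_ceiling
--         if v < bass_floor:
--             v = bass_floor
--         out.append(v)
--     return out
-- ===== Notes on version B (the rewrite author's own statement) =====
-- stated objective: faster
-- what changed: B replaces A's two conditional whole-list shift passes plus a max/min clamp pass by one closed-form net offset max(bass_floor - notes[0], min(0, soprano_ceiling - notes[-1])) and a single explicit loop that transposes and saturates each note with two branch tests.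
import Mathlib
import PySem

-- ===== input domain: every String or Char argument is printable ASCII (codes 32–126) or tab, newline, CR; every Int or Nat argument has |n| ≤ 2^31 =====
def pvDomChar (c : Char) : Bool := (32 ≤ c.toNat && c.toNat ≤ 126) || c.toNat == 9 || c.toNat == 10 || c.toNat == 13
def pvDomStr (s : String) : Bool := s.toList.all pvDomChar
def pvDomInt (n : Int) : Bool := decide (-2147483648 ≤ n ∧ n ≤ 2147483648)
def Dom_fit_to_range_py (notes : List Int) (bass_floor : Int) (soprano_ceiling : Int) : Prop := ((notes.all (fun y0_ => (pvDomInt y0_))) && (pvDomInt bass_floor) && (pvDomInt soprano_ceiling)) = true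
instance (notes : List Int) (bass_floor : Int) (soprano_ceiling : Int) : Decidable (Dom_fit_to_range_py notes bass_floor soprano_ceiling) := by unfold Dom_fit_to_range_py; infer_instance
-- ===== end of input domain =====

-- B replaces A's staged conditional shift passes by one closed-form net offset
-- and a single accumulator loop with branch-based saturation (objective: alternative).


-- ===== PORT A =====
-- literal transliteration of A: empty guard, two conditional shift passes, clamp pass
-- (notes[-1]/notes[0] on the nonempty list are exact as getLast?/head? with a dummy default)
def fit_to_range_py (notes : List Int) (bass_floor : Int) (soprano_ceiling : Int) : List Int :=
  if notes = [] then notes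
  else
    let notes1 :=
      if notes.getLast?.getD 0 > soprano_ceiling then
        notes.map (fun n => n - (notes.getLast?.getD 0 - soprano_ceiling))
      else notes
    let notes2 :=
      if notes1.head?.getD 0 < bass_floor then
        notes1.map (fun n => n + (bass_floor - notes1.head?.getD 0))
      else notes1
    notes2.map (fun n => max bass_floor (min soprano_ceiling n))

-- ===== PORT B =====
-- literal transliteration of Source B: closed-form net offset, then one accumulator loop
-- with two saturation branches per element
def fit_to_range_py_alt (notes : List Int) (bass_floor : Int) (soprano_ceiling : Int) : List Int :=
  match notes with
  | [] => notes
  | first :: rest =>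
    let net := max (bass_floor - first) (min 0 (soprano_ceiling - (first :: rest).getLast?.getD 0))
    (first :: rest).foldl
      (fun out n =>
        let v := n + net
        let v := if v > soprano_ceiling then soprano_ceiling else v
        let v := if v < bass_floor then bass_floor else v
        out ++ [v]) []

-- ===== PRECONDITION & SPEC =====
def Spec_fit_to_range_py (notes : List Int) (bass_floor : Int) (soprano_ceiling : Int) (out : List Int) : Prop := out = fit_to_range_py_alt notes bass_floor soprano_ceiling
instance (notes : List Int) (bass_floor : Int) (soprano_ceiling : Int) (out : List Int) : Decidable (Spec_fit_to_range_py notes bass_floor soprano_ceiling out) := by unfold Spec_fit_to_range_py; infer_instance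

-- ===== CLAIM (what is proved, stated in full; the proofs are below) =====
def Claim_equal_fit_to_range_py : Prop := ∀ (notes : List Int) (bass_floor : Int) (soprano_ceiling : Int), Dom_fit_to_range_py notes bass_floor soprano_ceiling → Spec_fit_to_range_py notes bass_floor soprano_ceiling (fit_to_range_py notes bass_floor soprano_ceiling)

-- ===== LEMMAS AND PROOFS =====

-- B's append-accumulator loop is the map of its body
theorem foldl_append_map (f : Int → Int) :
    ∀ (l acc : List Int), List.foldl (fun out n => out ++ [f n]) acc l = acc ++ l.map f := by
  intro l
  induction l with
  | nil => simp
  | cons x xs ih => intro acc; simp [ih]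

theorem fit_cons (first : Int) (rest : List Int) (bf sc : Int) :
    fit_to_range_py (first :: rest) bf sc = fit_to_range_py_alt (first :: rest) bf sc := by
  simp only [fit_to_range_py, fit_to_range_py_alt, if_neg (List.cons_ne_nil first rest)]
  rw [foldl_append_map (fun n =>
      let v := n + max (bf - first) (min 0 (sc - (first :: rest).getLast?.getD 0))
      let v := if v > sc then sc else v
      if v < bf then bf else v)]
  set l := ((first :: rest).getLast?.getD 0) with hl
  simp only [List.nil_append]
  by_cases h1 : l > sc
  · simp only [if_pos h1, List.map_map, List.head?_map, List.head?_cons, Option.map_some,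
      Option.getD_some, Function.comp_def]
    by_cases h2 : first - (l - sc) < bf
    · simp only [if_pos h2, List.map_map, Function.comp_def]
      apply List.map_congr_left
      intro n _
      split_ifs <;> omega
    · simp only [if_neg h2, List.map_map, Function.comp_def]
      apply List.map_congr_left
      intro n _
      split_ifs <;> omega
  · simp only [if_neg h1, List.head?_cons, Option.getD_some]
    by_cases h2 : first < bf
    · simp only [if_pos h2, List.map_map, Function.comp_def]
      apply List.map_congr_left
      intro n _
      split_ifs <;> omega
    · simp only [if_neg h2]
      apply List.map_congr_left
      intro n _
      split_ifs <;> omega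

-- ===== VERDICT (by name: the statement is the Claim_ definition above) =====
theorem fit_to_range_py_spec : Claim_equal_fit_to_range_py := by
  intro notes bf sc _
  unfold Spec_fit_to_range_py
  cases notes with
  | nil => rfl
  | cons first rest => exact fit_cons first rest bf sc
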